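-- pv_equiv track=rewrite | github.com/vjks/raspberry-pi-python-programs | CodeChef/above_1000_python/BRACKETS.py | find_max_balance
-- ===== SOURCE A (Python) =====
-- def find_max_balance(a):
--     balance = 0
--     max_balance = 0
--
--     for _ in range(len(a)):
--         if a[_] == '(':
--             balance += 1
--
--         if a[_] == ')':
--             balance -= 1
--
--         max_balance = max(max_balance, balance)
--
--     return max_balance
-- ===== SOURCE B (Python) =====
-- def find_max_balance(a):
--     # Divide and conquer: each segment is summarised by (total delta, clamped max
--     # prefix balance); summaries combine associatively, so split in half and merge.
--     def go(s):
--         if len(s) == 0: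
--             return (0, 0)
--         if len(s) == 1:
--             d = 1 if s == '(' else -1 if s == ')' else 0
--             return (d, max(0, d))
--         mid = len(s) // 2
--         s1, m1 = go(s[:mid])
--         s2, m2 = go(s[mid:])
--         return (s1 + s2, max(m1, s1 + m2))
--     return go(a)[1]
-- ===== Notes on version B (the rewrite author's own statement) =====
-- stated objective: alternative
-- what changed: Replaces A's single left-to-right loop with two mutable counters by a divide-and-conquer recursion: each half is summarised as (segment delta sum, clamped max prefix balance) and the two summaries are merged with the associative rule (s1+s2, max(m1, s1+m2)).
import Mathlib
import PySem

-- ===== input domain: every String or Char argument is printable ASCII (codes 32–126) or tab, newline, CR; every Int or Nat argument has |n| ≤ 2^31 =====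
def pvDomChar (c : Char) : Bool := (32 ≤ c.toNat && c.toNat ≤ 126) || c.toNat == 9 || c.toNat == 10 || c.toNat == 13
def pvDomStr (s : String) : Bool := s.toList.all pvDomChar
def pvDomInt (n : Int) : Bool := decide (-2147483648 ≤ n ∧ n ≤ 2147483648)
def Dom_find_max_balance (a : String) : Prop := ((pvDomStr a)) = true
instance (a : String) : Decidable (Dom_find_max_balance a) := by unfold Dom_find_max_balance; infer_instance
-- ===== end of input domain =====

-- B: divide-and-conquer on halves with the associative summary (segment sum, clamped max prefix); alternative decomposition, same result.
-- ===== PORT A =====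
-- A: for each index, update balance by the bracket, then max_balance = max(max_balance, balance)
def find_max_balance (a : String) : Int :=
  (a.toList.foldl
    (fun (st : Int × Int) c =>
      let balance := if c = '(' then st.1 + 1 else st.1
      let balance := if c = ')' then balance - 1 else balance
      (balance, max st.2 balance))
    (0, 0)).2

-- ===== PORT B =====
-- go(s): (total delta of s, clamped max prefix balance of s), by splitting s at len//2
def pvGo (s : List Char) : Int × Int :=
  if s.length = 0 then (0, 0)
  else if s.length = 1 then
    let d : Int := if s = ['('] then 1 else if s = [')'] then -1 else 0
    (d, max 0 d)
  else
    let mid := s.length / 2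
    let p1 := pvGo (s.take mid)
    let p2 := pvGo (s.drop mid)
    (p1.1 + p2.1, max p1.2 (p1.1 + p2.2))
termination_by s.length
decreasing_by
  · simp only [List.length_take]; omega
  · simp only [List.length_drop]; omega

def find_max_balance_alt (a : String) : Int := (pvGo a.toList).2

-- ===== PRECONDITION & SPEC =====
def Spec_find_max_balance (a : String) (out : Int) : Prop := out = find_max_balance_alt a
instance (a : String) (out : Int) : Decidable (Spec_find_max_balance a out) := by unfold Spec_find_max_balance; infer_instance

-- ===== CLAIM (what is proved, stated in full; the proofs are below) =====
def Claim_equal_find_max_balance : Prop := ∀ (a : String), Dom_find_max_balance a → Spec_find_max_balance a (find_max_balance a)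

-- ===== LEMMAS AND PROOFS =====
-- delta of one character
def pvDelta (c : Char) : Int := if c = '(' then 1 else if c = ')' then -1 else 0

-- clamped max prefix balance of a delta list
def pvR : List Int → Int
  | [] => 0
  | d :: ds => max 0 (d + pvR ds)

theorem pvR_nonneg (l : List Int) : 0 ≤ pvR l := by
  cases l with
  | nil => simp [pvR]
  | cons d ds => simp [pvR]

theorem pvR_append (x y : List Int) : pvR (x ++ y) = max (pvR x) (x.sum + pvR y) := by
  induction x with
  | nil =>
    have := pvR_nonneg y
    simp [pvR]; omega
  | cons d x ih =>
    simp only [List.cons_append, pvR, ih, List.sum_cons]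
    omega

-- A's fold from state (b, m) with b ≤ m computes max m (b + clamped max prefix)
theorem pv_inv (l : List Char) (b m : Int) (h : b ≤ m) :
    (l.foldl
      (fun (st : Int × Int) c =>
        let balance := if c = '(' then st.1 + 1 else st.1
        let balance := if c = ')' then balance - 1 else balance
        (balance, max st.2 balance))
      (b, m)).2 = max m (b + pvR (l.map pvDelta)) := by
  induction l generalizing b m with
  | nil => simp [pvR]; omega
  | cons c l ih =>
    have hR := pvR_nonneg (l.map pvDelta)
    simp only [List.foldl, List.map, pvR]
    have hb : (if c = ')' then (if c = '(' then b + 1 else b) - 1 else if c = '(' then b + 1 else b)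
        = b + pvDelta c := by
      unfold pvDelta
      by_cases h1 : c = '(' <;> by_cases h2 : c = ')' <;> simp_all [sub_eq_add_neg]
    rw [hb, ih (b + pvDelta c) (max m (b + pvDelta c)) (le_max_right _ _)]
    omega

-- B's recursion computes (segment sum, clamped max prefix) of the delta list
theorem pvGo_eq (s : List Char) : pvGo s = ((s.map pvDelta).sum, pvR (s.map pvDelta)) := by
  induction s using pvGo.induct with
  | case1 s h =>
    rw [pvGo]
    rcases List.length_eq_zero_iff.mp h with rfl
    simp [pvR]
  | case2 s h0 h1 =>
    rw [pvGo]
    rcases List.length_eq_one_iff.mp h1 with ⟨c, rfl⟩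
    simp only [h1]
    unfold pvDelta
    by_cases hc1 : c = '(' <;> by_cases hc2 : c = ')' <;> simp_all [pvR]
  | case3 s h0 h1 mid ih1 ih2 =>
    rw [pvGo]
    simp only [if_neg h0, if_neg h1]
    rw [ih1, ih2]
    have hsplit : s.map pvDelta = (s.take (s.length / 2)).map pvDelta ++ (s.drop (s.length / 2)).map pvDelta := by
      rw [← List.map_append, List.take_append_drop]
    rw [hsplit, List.sum_append, pvR_append]

-- ===== VERDICT (by name: the statement is the Claim_ definition above) =====
theorem find_max_balance_spec : Claim_equal_find_max_balance := by
  intro a _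
  unfold Spec_find_max_balance find_max_balance find_max_balance_alt
  rw [pv_inv _ 0 0 le_rfl, pvGo_eq]
  have := pvR_nonneg (a.toList.map pvDelta)
  simp; omega
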